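-- pv_equiv track=rewrite | github.com/azrael1865/Saraphis | independent_core/compression_systems/padic/padic_mathematical_operations.py | padic_expansion
-- ===== SOURCE A (Python) =====
-- def padic_expansion(n: int, p: int, precision: int = 10) -> list:
--     """
--     Compute the p-adic expansion of an integer.
--
--     Represents n as sum of a_i * p^i where 0 <= a_i < p.
--
--     Args:
--         n: Integer to expand
--         p: Prime base
--         precision: Number of digits to compute
--
--     Returns:
--         List of p-adic digits [a_0, a_1, ..., a_{precision-1}]
--     """
--     if n == 0:
--         return [0] * precision
--
--     digits = []
--     remainder = abs(n)
--
--     for _ in range(precision):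
--         digit = remainder % p
--         digits.append(digit)
--         remainder = remainder // p
--
--         if remainder == 0:
--             # Pad with zeros if needed
--             while len(digits) < precision:
--                 digits.append(0)
--             break
--
--     # Handle negative numbers
--     if n < 0:
--         # In p-adic representation, use complement
--         carry = 1
--         for i in range(len(digits)):
--             digits[i] = (p - 1 - digits[i] + carry) % p
--             carry = (p - 1 - digits[i] + carry) // p
--
--     return digits
-- ===== SOURCE B (Python) =====
-- def padic_expansion(n: int, p: int, precision: int = 10) -> list:
--     # Single uniform extraction loop: Python's floor mod yields the p-adic
--     # complement digits for negative n directly, so no abs / complement pass.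
--     if n == 0:
--         return [0] * precision
--     digits = []
--     m = n
--     for _ in range(precision):
--         digits.append(m % p)
--         m //= p
--     return digits
-- ===== Notes on version B (the rewrite author's own statement) =====
-- stated objective: simpler
-- what changed: B drops abs(n), the early-break zero padding and the whole two-phase complement-with-carry pass: one uniform loop appending m % p and flooring m //= p, since Python's floor mod already produces the p-adic complement digits for negative n.
import Mathlib
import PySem

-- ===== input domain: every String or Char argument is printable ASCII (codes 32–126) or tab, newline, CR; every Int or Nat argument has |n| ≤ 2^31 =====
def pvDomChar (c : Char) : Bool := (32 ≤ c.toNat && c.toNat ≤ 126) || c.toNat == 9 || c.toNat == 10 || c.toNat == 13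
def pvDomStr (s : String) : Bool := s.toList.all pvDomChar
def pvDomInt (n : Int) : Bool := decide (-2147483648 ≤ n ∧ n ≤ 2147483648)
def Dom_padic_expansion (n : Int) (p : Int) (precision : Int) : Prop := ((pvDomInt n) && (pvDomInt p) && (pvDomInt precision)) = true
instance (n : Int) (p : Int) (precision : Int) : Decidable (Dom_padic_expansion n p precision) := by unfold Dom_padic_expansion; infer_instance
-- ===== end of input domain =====

-- B replaces A's abs/extract/complement phases by one uniform floor-mod loop (objective: simpler).

-- ===== PORT A =====
-- A's digit loop: for _ in range(precision): append remainder % p; remainder //= p;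
-- on remainder == 0 break and pad with zeros up to precision (k zeros remain).
def pvALoop (p : Int) : Nat → Int → List Int
  | 0, _ => []
  | k+1, r =>
      let d := PySem.Int.mod r p
      let r' := PySem.Int.floordiv r p
      if r' = 0 then d :: List.replicate k 0
      else d :: pvALoop p k r'

-- A's complement pass for n < 0: digits[i] = (p-1-digits[i]+carry) % p;
-- carry = (p-1-digits[i]+carry) // p  (with the UPDATED digits[i]).
def pvAComp (p : Int) : Int → List Int → List Int
  | _, [] => []
  | c, d :: rest =>
      let e := PySem.Int.mod (p - 1 - d + c) p
      let c' := PySem.Int.floordiv (p - 1 - e + c) p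
      e :: pvAComp p c' rest

def padic_expansion (n : Int) (p : Int) (precision : Int) : List Int :=
  if n = 0 then List.replicate precision.toNat 0
  else if n < 0 then pvAComp p 1 (pvALoop p precision.toNat |n|)
  else pvALoop p precision.toNat |n|

-- ===== PORT B =====
-- B's single loop: for _ in range(precision): append m % p; m //= p.
def pvBLoop (p : Int) : Nat → Int → List Int
  | 0, _ => []
  | k+1, m => PySem.Int.mod m p :: pvBLoop p k (PySem.Int.floordiv m p)

def padic_expansion_alt (n : Int) (p : Int) (precision : Int) : List Int :=
  if n = 0 then List.replicate precision.toNat 0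
  else pvBLoop p precision.toNat n

-- ===== PRECONDITION & SPEC =====
-- Pre_ excludes exactly p = 0 with n ≠ 0 and precision > 0, where Python A (and B) raise ZeroDivisionError.
def Pre_padic_expansion (n : Int) (p : Int) (precision : Int) : Prop := n = 0 ∨ p ≠ 0 ∨ precision ≤ 0
instance (n : Int) (p : Int) (precision : Int) : Decidable (Pre_padic_expansion n p precision) := by unfold Pre_padic_expansion; infer_instance
def pvWitness_padic_expansion : Int × Int × Int := (-7, 3, 5)

def Spec_padic_expansion (n : Int) (p : Int) (precision : Int) (out : List Int) : Prop := out = padic_expansion_alt n p precision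
instance (n : Int) (p : Int) (precision : Int) (out : List Int) : Decidable (Spec_padic_expansion n p precision out) := by unfold Spec_padic_expansion; infer_instance

-- ===== CLAIM (what is proved, stated in full; the proofs are below) =====
def Claim_equal_padic_expansion : Prop := ∀ (n : Int) (p : Int) (precision : Int), Dom_padic_expansion n p precision → Pre_padic_expansion n p precision → Spec_padic_expansion n p precision (padic_expansion n p precision)

-- ===== LEMMAS AND PROOFS =====

-- shift lemma: adding p*t shifts floordiv by t and keeps mod
theorem pv_fd_shift (p a t : Int) (hp : p ≠ 0) :
    PySem.Int.floordiv (a + p * t) p = PySem.Int.floordiv a p + t ∧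
    PySem.Int.mod (a + p * t) p = PySem.Int.mod a p := by
  have h1 := PySem.Int.floordiv_mul_add_mod a p
  have h2 := PySem.Int.floordiv_mul_add_mod (a + p * t) p
  set q := PySem.Int.floordiv a p with hq
  set m := PySem.Int.mod a p with hm
  set Q := PySem.Int.floordiv (a + p * t) p with hQ
  set M := PySem.Int.mod (a + p * t) p with hM
  have key : (Q - q - t) * p = m - M := by ring_nf; linarith
  have hQeq : Q = q + t := by
    rcases lt_or_gt_of_ne hp with hneg | hpos
    · have b1 := PySem.Int.mod_neg_bounds a hneg
      have b2 := PySem.Int.mod_neg_bounds (a + p * t) hneg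
      rcases lt_trichotomy (Q - q - t) 0 with h | h | h
      · exfalso; nlinarith [mul_nonneg (by omega : (0:Int) ≤ -(Q - q - t) - 1) (by omega : (0:Int) ≤ -p)]
      · omega
      · exfalso; nlinarith [mul_nonneg (by omega : (0:Int) ≤ (Q - q - t) - 1) (by omega : (0:Int) ≤ -p)]
    · have b1l := PySem.Int.mod_nonneg a hpos
      have b1r := PySem.Int.mod_lt a hpos
      have b2l := PySem.Int.mod_nonneg (a + p * t) hpos
      have b2r := PySem.Int.mod_lt (a + p * t) hpos
      rcases lt_trichotomy (Q - q - t) 0 with h | h | h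
      · exfalso; nlinarith [mul_nonneg (by omega : (0:Int) ≤ -(Q - q - t) - 1) (by omega : (0:Int) ≤ p)]
      · omega
      · exfalso; nlinarith [mul_nonneg (by omega : (0:Int) ≤ (Q - q - t) - 1) (by omega : (0:Int) ≤ p)]
  refine ⟨hQeq, ?_⟩
  have h0 : Q - q - t = 0 := by omega
  rw [h0, zero_mul] at key
  omega

theorem pv_mod_zero_left (p : Int) : PySem.Int.mod 0 p = 0 := by
  simp [PySem.Int.mod]

theorem pv_fd_zero_left (p : Int) : PySem.Int.floordiv 0 p = 0 := by
  simp [PySem.Int.floordiv]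

theorem pv_bLoop_zero (p : Int) : ∀ k, pvBLoop p k 0 = List.replicate k 0
  | 0 => rfl
  | k+1 => by
      simp [pvBLoop, pv_mod_zero_left, pv_fd_zero_left, pv_bLoop_zero p k, List.replicate_succ]

-- A's break + zero padding is exactly continuing B's loop on remainder 0
theorem pv_aLoop_eq (p : Int) : ∀ k r, pvALoop p k r = pvBLoop p k r
  | 0, _ => rfl
  | k+1, r => by
      simp only [pvALoop, pvBLoop]
      by_cases h : PySem.Int.floordiv r p = 0
      · simp [h, pv_bLoop_zero]
      · simp [h, pv_aLoop_eq p k]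

-- complement invariant: with carry c the pass rewrites the digits of r into the digits of c - 1 - r
theorem pv_comp_eq (p : Int) (hp : p ≠ 0) : ∀ (k : Nat) (r c : Int),
    pvAComp p c (pvBLoop p k r) = pvBLoop p k (c - 1 - r)
  | 0, _, _ => rfl
  | k+1, r, c => by
      have hr := PySem.Int.floordiv_mul_add_mod r p
      have hs := PySem.Int.floordiv_mul_add_mod (c - 1 - r) p
      have e1 : p - 1 - PySem.Int.mod r p + c = (c - 1 - r) + p * (PySem.Int.floordiv r p + 1) := by
        ring_nf; linarith
      have hmod : PySem.Int.mod (p - 1 - PySem.Int.mod r p + c) p = PySem.Int.mod (c - 1 - r) p := by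
        rw [e1]; exact (pv_fd_shift p (c - 1 - r) (PySem.Int.floordiv r p + 1) hp).2
      have e2 : p - 1 - PySem.Int.mod (c - 1 - r) p + c
          = r + p * (PySem.Int.floordiv (c - 1 - r) p + 1) := by
        ring_nf at hs ⊢; linarith
      have hcar : PySem.Int.floordiv (p - 1 - PySem.Int.mod (c - 1 - r) p + c) p
          = PySem.Int.floordiv r p + (PySem.Int.floordiv (c - 1 - r) p + 1) := by
        rw [e2]; exact (pv_fd_shift p r (PySem.Int.floordiv (c - 1 - r) p + 1) hp).1
      simp only [pvBLoop, pvAComp, hmod, hcar, List.cons.injEq, true_and]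
      rw [pv_comp_eq p hp k]
      congr 1
      ring

-- ===== VERDICT (by name: the statement is the Claim_ definition above) =====
theorem padic_expansion_spec : Claim_equal_padic_expansion := by
  intro n p precision _ hpre
  unfold Spec_padic_expansion padic_expansion padic_expansion_alt
  by_cases hn : n = 0
  · simp [hn]
  · by_cases hprec : precision ≤ 0
    · have h0 : precision.toNat = 0 := by omega
      rcases lt_or_ge n 0 with h | h <;>
        simp [hn, h0, pvALoop, pvBLoop, pvAComp, not_lt.mpr, h]
    · have hp : p ≠ 0 := by
        rcases hpre with h | h | h
        · exact absurd h hn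
        · exact h
        · exact absurd h hprec
      simp only [if_neg hn]
      by_cases hneg : n < 0
      · have habs : |n| = -n := abs_of_neg hneg
        simp only [if_pos hneg, habs, pv_aLoop_eq, pv_comp_eq p hp]
        congr 1
        ring
      · have habs : |n| = n := abs_of_nonneg (by omega)
        simp [if_neg hneg, habs, pv_aLoop_eq]
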